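-- pv_equiv track=rewrite | github.com/CastroClarence/CS50P | problem2/plates/plates.py | is_end
-- ===== SOURCE A (Python) =====
-- def is_end(plate):
--     seen_num = False
--
--     for  letter in plate:
--         if letter.isnumeric():
--             if not seen_num:
--                 seen_num = True
--                 if letter == "0":
--                     return False
--         else:
--             if seen_num:
--                 return False
--
--     return True
-- ===== SOURCE B (Python) =====
-- def is_end(plate):
--     for i, c in enumerate(plate):
--         if c.isnumeric():
--             return c != "0" and plate[i:].isnumeric()
--     return True
-- ===== Notes on version B (the rewrite author's own statement) =====
-- stated objective: simpler
-- what changed: Replaces the seen_num flag state machine with a find-the-first-digit loop followed by a single bulk suffix check (first digit nonzero and plate[i:] all numeric).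
import Mathlib
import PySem

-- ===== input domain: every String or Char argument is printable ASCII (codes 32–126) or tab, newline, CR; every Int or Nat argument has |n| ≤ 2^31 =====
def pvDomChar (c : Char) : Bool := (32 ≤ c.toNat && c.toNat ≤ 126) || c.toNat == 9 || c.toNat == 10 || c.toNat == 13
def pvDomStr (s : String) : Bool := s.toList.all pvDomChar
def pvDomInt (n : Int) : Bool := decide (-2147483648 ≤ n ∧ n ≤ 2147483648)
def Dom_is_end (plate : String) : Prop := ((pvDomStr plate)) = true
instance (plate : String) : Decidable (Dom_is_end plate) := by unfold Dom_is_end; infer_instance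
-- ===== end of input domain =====

-- B replaces A's seen_num flag state machine by "find the first digit, then one bulk suffix check" (simpler decomposition; same O(n) cost).
-- On the printable-ASCII domain, Python's str.isnumeric on a single character is exactly PySem.Chars.isdigit.

-- ===== PORT A =====
-- the for-loop with the seen_num flag, early returns kept as returned Bools
def isEndLoopA : Bool → List Char → Bool
  | _, [] => true
  | seen, c :: cs =>
    if PySem.Chars.isdigit c then
      if !seen then
        if c = '0' then false else isEndLoopA true cs
      else isEndLoopA seen cs
    else
      if seen then false else isEndLoopA seen cs

def is_end (plate : String) : Bool := isEndLoopA false plate.toList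

-- ===== PORT B =====
-- scan for the first numeric character; at it, return (c != "0") and plate[i:].isnumeric()
-- (the suffix plate[i:] is exactly c :: cs here; isnumeric = nonempty ∧ all digits)
def isEndLoopB : List Char → Bool
  | [] => true
  | c :: cs =>
    if PySem.Chars.isdigit c then
      (c ≠ '0') && PySem.Chars.strIsdigit (c :: cs)
    else isEndLoopB cs

def is_end_alt (plate : String) : Bool := isEndLoopB plate.toList

-- ===== PRECONDITION & SPEC =====
def Spec_is_end (plate : String) (out : Bool) : Prop := out = is_end_alt plate
instance (plate : String) (out : Bool) : Decidable (Spec_is_end plate out) := by unfold Spec_is_end; infer_instance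

-- ===== CLAIM (what is proved, stated in full; the proofs are below) =====
def Claim_equal_is_end : Prop := ∀ (plate : String), Dom_is_end plate → Spec_is_end plate (is_end plate)

-- ===== LEMMAS AND PROOFS =====
theorem loopA_true (cs : List Char) : isEndLoopA true cs = cs.all PySem.Chars.isdigit := by
  induction cs with
  | nil => simp [isEndLoopA]
  | cons c cs ih => by_cases h : PySem.Chars.isdigit c <;> simp [isEndLoopA, h, ih]

theorem loopA_eq_loopB (cs : List Char) : isEndLoopA false cs = isEndLoopB cs := by
  induction cs with
  | nil => rfl
  | cons c cs ih =>
    by_cases h : PySem.Chars.isdigit c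
    · by_cases h0 : c = '0' <;>
        simp [isEndLoopA, isEndLoopB, PySem.Chars.strIsdigit, h, h0, loopA_true, ih]
    · simp [isEndLoopA, isEndLoopB, h, ih]

-- ===== VERDICT (by name: the statement is the Claim_ definition above) =====
theorem is_end_spec : Claim_equal_is_end := by
  intro plate _
  unfold Spec_is_end is_end is_end_alt
  exact loopA_eq_loopB plate.toList
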